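-- pv_equiv track=rewrite | github.com/lzhna/fedaf | compo/fed/load_dataset.py | idx2label
-- ===== SOURCE A (Python) =====
-- def idx2label(label_dict:dict, idxs):
--     lcount = {}
--     for idx in idxs:
--         for c in label_dict.keys():
--             if idx in label_dict[c]:
--                 lcount.setdefault(c, 0)
--                 lcount[c] += 1
--                 break
--     return lcount
-- ===== SOURCE B (Python) =====
-- def idx2label(label_dict: dict, idxs):
--     # inverted index: each member -> the first class (in label_dict order) containing it
--     first_class = {}
--     for c, members in label_dict.items():
--         for m in members:
--             first_class.setdefault(m, c)
--     lcount = {}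
--     for idx in idxs:
--         c = first_class.get(idx)
--         if c is not None:
--             lcount[c] = lcount.get(c, 0) + 1
--     return lcount
-- ===== Notes on version B (the rewrite author's own statement) =====
-- stated objective: faster
-- what changed: Replaces A's per-idx linear scan over all classes (with break) by a one-time inverted index mapping each member to its first containing class, then a single counting pass over idxs.
import Mathlib
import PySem

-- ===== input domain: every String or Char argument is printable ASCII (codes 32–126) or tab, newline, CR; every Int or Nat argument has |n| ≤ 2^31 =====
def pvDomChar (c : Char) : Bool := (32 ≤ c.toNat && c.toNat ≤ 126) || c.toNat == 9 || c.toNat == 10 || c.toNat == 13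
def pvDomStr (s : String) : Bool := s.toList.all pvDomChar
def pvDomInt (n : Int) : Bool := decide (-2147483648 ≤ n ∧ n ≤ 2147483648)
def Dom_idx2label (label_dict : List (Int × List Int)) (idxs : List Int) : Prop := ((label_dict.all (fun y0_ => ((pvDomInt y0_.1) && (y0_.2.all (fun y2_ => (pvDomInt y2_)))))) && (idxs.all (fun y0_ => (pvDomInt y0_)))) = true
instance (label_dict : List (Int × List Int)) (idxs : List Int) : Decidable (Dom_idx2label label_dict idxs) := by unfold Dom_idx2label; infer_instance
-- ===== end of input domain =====

-- B replaces A's per-idx scan over all classes by a precomputed inverted index (member -> first class), making one pass over idxs; asymptotically faster.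


-- ===== PORT A =====
-- inner loop of A: 'for c in label_dict.keys(): if idx in label_dict[c]: … break'
def idx2labelScan (d : PySem.Dict Int (List Int)) (idx : Int) (cs : List Int)
    (lc : PySem.Dict Int Int) : PySem.Dict Int Int :=
  match cs with
  | [] => lc
  | c :: rest =>
    if idx ∈ d.getD c [] then
      let lc1 := lc.setdefault c 0          -- lcount.setdefault(c, 0)
      lc1.insert c (lc1.getD c 0 + 1)       -- lcount[c] += 1, then break
    else idx2labelScan d idx rest lc

def idx2label (label_dict : List (Int × List Int)) (idxs : List Int) : List (Int × Int) :=
  let d := PySem.Dict.ofList label_dict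
  (idxs.foldl (fun lc idx => idx2labelScan d idx d.keys lc) PySem.Dict.empty).items

-- ===== PORT B =====
def idx2label_alt (label_dict : List (Int × List Int)) (idxs : List Int) : List (Int × Int) :=
  let d := PySem.Dict.ofList label_dict
  -- first_class: member -> first class (in dict order) containing it
  let fc : PySem.Dict Int Int :=
    d.items.foldl (fun fc p => p.2.foldl (fun fc m => fc.setdefault m p.1) fc) PySem.Dict.empty
  let lc : PySem.Dict Int Int :=
    idxs.foldl (fun lc idx =>
      match fc.get? idx with
      | some c => lc.insert c (lc.getD c 0 + 1)
      | none => lc) PySem.Dict.empty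
  lc.items

-- ===== PRECONDITION & SPEC =====
def Spec_idx2label (label_dict : List (Int × List Int)) (idxs : List Int) (out : List (Int × Int)) : Prop := out = idx2label_alt label_dict idxs
instance (label_dict : List (Int × List Int)) (idxs : List Int) (out : List (Int × Int)) : Decidable (Spec_idx2label label_dict idxs out) := by unfold Spec_idx2label; infer_instance

-- ===== CLAIM (what is proved, stated in full; the proofs are below) =====
def Claim_equal_idx2label : Prop := ∀ (label_dict : List (Int × List Int)) (idxs : List Int), Dom_idx2label label_dict idxs → Spec_idx2label label_dict idxs (idx2label label_dict idxs)

-- ===== LEMMAS AND PROOFS =====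

-- proof-side: the class A's inner scan would break on
def findC (d : PySem.Dict Int (List Int)) (idx : Int) : List Int → Option Int
  | [] => none
  | c :: rest => if idx ∈ d.getD c [] then some c else findC d idx rest

theorem foldl_ext_pv {α β : Type} (f g : α → β → α) (l : List β) (init : α)
    (h : ∀ a b, f a b = g a b) : l.foldl f init = l.foldl g init := by
  induction l generalizing init with
  | nil => rfl
  | cons x rest ih => simp only [List.foldl_cons, h, ih]

theorem scan_eq_findC (d : PySem.Dict Int (List Int)) (idx : Int) (cs : List Int)
    (lc : PySem.Dict Int Int) :
    idx2labelScan d idx cs lc =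
      match findC d idx cs with
      | some c => lc.insert c (lc.getD c 0 + 1)
      | none => lc := by
  induction cs generalizing lc with
  | nil => rfl
  | cons c rest ih =>
    simp only [idx2labelScan, findC]
    split_ifs with h
    · by_cases hc : lc.contains c = true
      · simp [PySem.Dict.setdefault_of_contains lc 0 hc]
      · have hcf : lc.contains c = false := by simpa using hc
        simp [PySem.Dict.setdefault_of_not_contains lc 0 hcf,
          PySem.Dict.getD_insert_self, PySem.Dict.insert_insert_self,
          PySem.Dict.getD_of_not_contains lc 0 hcf]
    · exact ih lc

theorem findC_map_fst (d : PySem.Dict Int (List Int)) (idx : Int)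
    (l : List (Int × List Int)) (h : ∀ p ∈ l, d.getD p.1 [] = p.2) :
    findC d idx (l.map Prod.fst) =
      (l.find? (fun p => decide (idx ∈ p.2))).map Prod.fst := by
  induction l with
  | nil => rfl
  | cons p rest ih =>
    have hrest := ih (fun q hq => h q (List.mem_cons_of_mem _ hq))
    simp only [List.map_cons, findC, List.find?, h p (List.mem_cons_self ..)]
    by_cases hm : idx ∈ p.2
    · simp [hm]
    · simp [hm, hrest]

theorem get?_setdefault_pv (fc : PySem.Dict Int Int) (k v m : Int) :
    (fc.setdefault k v).get? m =
      if k = m ∧ fc.contains k = false then some v else fc.get? m := by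
  by_cases hc : fc.contains k = true
  · rw [PySem.Dict.setdefault_of_contains fc v hc]; simp [hc]
  · have hcf : fc.contains k = false := by simpa using hc
    rw [PySem.Dict.setdefault_of_not_contains fc v hcf]
    by_cases hk : k = m
    · subst hk; simp [PySem.Dict.get?_insert_self, hcf]
    · rw [PySem.Dict.get?_insert_of_ne fc v (Ne.symm hk)]
      simp [hk]

theorem get?_fold_setdefault_inner (ms : List Int) (c : Int) (fc : PySem.Dict Int Int) (m : Int) :
    (ms.foldl (fun fc x => fc.setdefault x c) fc).get? m =
      ((fc.get? m).orElse (fun _ => if m ∈ ms then some c else none)) := by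
  induction ms generalizing fc with
  | nil => cases h : fc.get? m <;> simp [Option.orElse, h]
  | cons x rest ih =>
    simp only [List.foldl_cons, ih, get?_setdefault_pv]
    by_cases hmx : x = m
    · subst hmx
      by_cases hcf : fc.contains x = true
      · cases h : fc.get? x with
        | none =>
          have hco := PySem.Dict.contains_eq_isSome_get? fc x
          rw [h, hcf] at hco
          simp at hco
        | some v => simp [Option.orElse, hcf]
      · have hcf' : fc.contains x = false := by simpa using hcf
        have hn : fc.get? x = none := (PySem.Dict.get?_eq_none_iff_contains fc x).mpr hcf'
        simp [hn, hcf', Option.orElse]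
    · have hcond : ¬(x = m ∧ fc.contains x = false) := fun hp => hmx hp.1
      rw [if_neg hcond]
      cases h : fc.get? m with
      | some v => simp [Option.orElse]
      | none =>
        have hne : ¬m = x := fun h' => hmx h'.symm
        simp [Option.orElse, List.mem_cons, hne]

theorem get?_fold_setdefault (l : List (Int × List Int)) (fc : PySem.Dict Int Int) (m : Int) :
    (l.foldl (fun fc p => p.2.foldl (fun fc x => fc.setdefault x p.1) fc) fc).get? m =
      ((fc.get? m).orElse
        (fun _ => (l.find? (fun p => decide (m ∈ p.2))).map Prod.fst)) := by
  induction l generalizing fc with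
  | nil => cases h : fc.get? m <;> simp [Option.orElse, h]
  | cons p rest ih =>
    simp only [List.foldl_cons, ih, get?_fold_setdefault_inner, List.find?]
    by_cases hm : m ∈ p.2
    · cases h : fc.get? m <;> simp [Option.orElse, hm]
    · cases h : fc.get? m <;> simp [Option.orElse, hm]

theorem fc_get?_eq_findC (d : PySem.Dict Int (List Int)) (hnd : d.keys.Nodup) (idx : Int) :
    (d.items.foldl (fun fc p => p.2.foldl (fun fc m => fc.setdefault m p.1) fc)
        PySem.Dict.empty).get? idx = findC d idx d.keys := by
  rw [get?_fold_setdefault]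
  rw [show d.keys = d.items.map Prod.fst from rfl]
  rw [findC_map_fst d idx d.items
    (fun p hp => PySem.Dict.getD_of_mem_items d (by simpa using hp) hnd [])]
  cases h : (d.items.find? (fun p => decide (idx ∈ p.2))).map Prod.fst <;>
    simp [PySem.Dict.get?_empty, Option.orElse]

-- ===== VERDICT (by name: the statement is the Claim_ definition above) =====
theorem idx2label_spec : Claim_equal_idx2label := by
  intro label_dict idxs _
  unfold Spec_idx2label idx2label idx2label_alt
  show (idxs.foldl
      (fun lc idx => idx2labelScan (PySem.Dict.ofList label_dict) idx
        (PySem.Dict.ofList label_dict).keys lc) PySem.Dict.empty).items =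
    (idxs.foldl
      (fun lc idx =>
        match ((PySem.Dict.ofList label_dict).items.foldl
            (fun fc p => p.2.foldl (fun fc m => fc.setdefault m p.1) fc)
            PySem.Dict.empty).get? idx with
        | some c => lc.insert c (lc.getD c 0 + 1)
        | none => lc) (PySem.Dict.empty : PySem.Dict Int Int)).items
  congr 1
  apply foldl_ext_pv
  intro lc idx
  rw [scan_eq_findC,
    fc_get?_eq_findC (PySem.Dict.ofList label_dict) (PySem.Dict.nodup_keys_ofList label_dict) idx]
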